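-- pv_equiv track=rewrite | github.com/deepaksaipendyala/ActiveRAG-Next | graph/nodes.py | truncate_passages
-- ===== SOURCE A (Python) =====
-- from typing import List, Dict, Any, Literal
--
-- def truncate_passages(passages: List[str], max_chars: int = 7000) -> List[str]:
--     total, output = 0, []
--     for passage in passages:
--         if total + len(passage) > max_chars:
--             break
--         output.append(passage)
--         total += len(passage)
--     return output
-- ===== SOURCE B (Python) =====
-- def truncate_passages(passages, max_chars=7000):
--     # prefix sums of passage lengths, then count how many stay within budget, then slice
--     cums = []
--     total = 0
--     for n in map(len, passages):
--         total += n
--         cums.append(total)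
--     k = sum(1 for c in cums if c <= max_chars)
--     return passages[:k]
-- ===== Notes on version B (the rewrite author's own statement) =====
-- stated objective: alternative
-- what changed: Replaced the incremental append-until-break loop by a prefix-sum table over the passage lengths, a count of cumulative sums within the budget, and a single slice passages[:k].
import Mathlib
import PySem

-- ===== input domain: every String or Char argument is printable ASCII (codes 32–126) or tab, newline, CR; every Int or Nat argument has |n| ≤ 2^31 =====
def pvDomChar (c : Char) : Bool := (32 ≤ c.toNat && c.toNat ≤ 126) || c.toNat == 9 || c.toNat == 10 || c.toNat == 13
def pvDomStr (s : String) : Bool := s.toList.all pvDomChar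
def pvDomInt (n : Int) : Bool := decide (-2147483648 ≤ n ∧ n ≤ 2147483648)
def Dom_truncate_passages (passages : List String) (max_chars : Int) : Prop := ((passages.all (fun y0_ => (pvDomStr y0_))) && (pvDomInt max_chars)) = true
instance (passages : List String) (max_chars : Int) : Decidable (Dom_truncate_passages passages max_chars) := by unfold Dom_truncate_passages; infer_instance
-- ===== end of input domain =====

-- B replaces A's append-until-break loop by a prefix-sum table, a count of sums within budget, and one slice (alternative decomposition, same cost).


-- ===== PORT A =====
-- loop 'for passage in passages: if total+len>max: break; append; total+=len' as structural recursion over the list with the running total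
def truncateGoA (max_chars : Int) : List String → Int → List String
  | [], _ => []
  | p :: rest, total =>
    if total + PySem.Str.len p > max_chars then []
    else p :: truncateGoA max_chars rest (total + PySem.Str.len p)

def truncate_passages (passages : List String) (max_chars : Int) : List String :=
  truncateGoA max_chars passages 0

-- ===== PORT B =====
-- prefix sums of the passage lengths starting from a running total
def truncateCums (acc : Int) : List String → List Int
  | [] => []
  | p :: rest => (acc + PySem.Str.len p) :: truncateCums (acc + PySem.Str.len p) rest

def truncate_passages_alt (passages : List String) (max_chars : Int) : List String :=
  let cums := truncateCums 0 passages
  let k : Int := (cums.countP (fun c => decide (c ≤ max_chars)) : Int)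
  PySem.List.slice passages none (some k)

-- ===== PRECONDITION & SPEC =====
def Spec_truncate_passages (passages : List String) (max_chars : Int) (out : List String) : Prop := out = truncate_passages_alt passages max_chars
instance (passages : List String) (max_chars : Int) (out : List String) : Decidable (Spec_truncate_passages passages max_chars out) := by unfold Spec_truncate_passages; infer_instance

-- ===== CLAIM (what is proved, stated in full; the proofs are below) =====
def Claim_equal_truncate_passages : Prop := ∀ (passages : List String) (max_chars : Int), Dom_truncate_passages passages max_chars → Spec_truncate_passages passages max_chars (truncate_passages passages max_chars)

-- ===== LEMMAS AND PROOFS =====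

-- every prefix sum starting from t is at least t (string lengths are nonnegative)
lemma truncateCums_ge (l : List String) : ∀ (t : Int) (c : Int), c ∈ truncateCums t l → t ≤ c := by
  induction l with
  | nil => intro t c h; simp [truncateCums] at h
  | cons p rest ih =>
    intro t c h
    simp only [truncateCums, List.mem_cons] at h
    have hlen : (0 : Int) ≤ PySem.Str.len p := by simp [PySem.Str.len_eq]
    rcases h with h | h
    · omega
    · have := ih (t + PySem.Str.len p) c h; omega

lemma truncateGoA_eq_take (max_chars : Int) (l : List String) :
    ∀ (t : Int), truncateGoA max_chars l t =
      l.take ((truncateCums t l).countP (fun c => decide (c ≤ max_chars))) := by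
  induction l with
  | nil => intro t; rfl
  | cons p rest ih =>
    intro t
    have hlen : PySem.Str.len p = (p.length : Int) := PySem.Str.len_eq p
    simp only [truncateGoA, truncateCums, List.countP_cons, hlen]
    by_cases h : max_chars < t + (p.length : Int)
    · have hz : (truncateCums (t + (p.length : Int)) rest).countP
          (fun c => decide (c ≤ max_chars)) = 0 := by
        rw [List.countP_eq_zero]
        intro c hc
        have := truncateCums_ge rest (t + (p.length : Int)) c (by simpa [hlen] using hc)
        simp; omega
      rw [if_pos h, hz]
      simp [show ¬ (t + (p.length : Int) ≤ max_chars) from by omega]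
    · rw [if_neg h, ih]
      simp [show t + (p.length : Int) ≤ max_chars from by omega]

-- ===== VERDICT (by name: the statement is the Claim_ definition above) =====
theorem truncate_passages_spec : Claim_equal_truncate_passages := by
  intro passages max_chars _
  unfold Spec_truncate_passages truncate_passages truncate_passages_alt
  rw [PySem.List.slice_to_natCast, truncateGoA_eq_take]
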